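-- pv_equiv track=rewrite | github.com/kazuhiko1979/edabit | 58_hard_Factorials.py | filter_factorials
-- ===== SOURCE A (Python) =====
-- def filter_factorials(lst):
--
--     factorials =[1]
--     n = max(lst)
--     temp = 1
--     for i in range(1, n+1):
--         temp *= i
--         factorials.append(temp)
--     return [i for i in lst if i in factorials]
-- ===== SOURCE B (Python) =====
-- def filter_factorials(lst):
--     def is_factorial(x):
--         f = d = 1
--         while f < x:
--             d += 1
--             f *= d
--         return f == x
--     return [x for x in lst if is_factorial(x)]
-- ===== Notes on version B (the rewrite author's own statement) =====
-- stated objective: faster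
-- what changed: B tests each element for factoriality directly with a per-element multiply-up loop (f=d=1; while f<x: d+=1; f*=d; keep iff f==x) instead of precomputing a table of all max(lst) factorials and linearly scanning it per element.
-- outside the precondition, e.g. on filter_factorials([]): A raises ValueError, B returns []
import Mathlib
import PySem

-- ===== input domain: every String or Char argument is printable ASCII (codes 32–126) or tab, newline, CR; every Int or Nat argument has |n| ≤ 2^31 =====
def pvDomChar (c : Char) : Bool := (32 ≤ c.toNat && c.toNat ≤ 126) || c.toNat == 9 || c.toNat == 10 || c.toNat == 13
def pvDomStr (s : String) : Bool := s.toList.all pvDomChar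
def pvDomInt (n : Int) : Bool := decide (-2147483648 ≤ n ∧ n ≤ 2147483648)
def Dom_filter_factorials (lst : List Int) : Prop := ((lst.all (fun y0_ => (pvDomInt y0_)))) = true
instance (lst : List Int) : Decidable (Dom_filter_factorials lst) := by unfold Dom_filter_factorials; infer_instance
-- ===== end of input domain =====

-- B tests each element directly for being a factorial instead of precomputing a table
-- of all factorials up to max(lst); same values on every non-empty list, without ever forming the huge factorials up to max(lst) (objective: faster).

-- ===== PORT A =====
def filter_factorials (lst : List Int) : List Int :=
  match PySem.List.max? lst (fun x => x) with
  | none => []   -- unreachable under Pre_: Python's max raises ValueError on []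
  | some n =>
    let st := (PySem.List.pyRange 1 (n+1) 1).foldl
      (fun (st : List Int × Int) i => (st.1 ++ [st.2 * i], st.2 * i)) ([1], 1)
    lst.filter (fun i => st.1.contains i)

-- ===== PORT B =====
-- the 'while f < x: d += 1; f *= d' loop of Source B; the 0 < f / 0 < d conjuncts only
-- make the recursion total (they hold on every reachable state, which starts at 1, 1)
def isFactAux (x f d : Int) : Int :=
  if h : f < x ∧ 0 < f ∧ 0 < d then isFactAux x (f * (d + 1)) (d + 1) else f
termination_by (x - f).toNat
decreasing_by
  have h2 : f < f * (d + 1) := by nlinarith [h.2.1, h.2.2]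
  omega

def filter_factorials_alt (lst : List Int) : List Int :=
  lst.filter (fun x => isFactAux x 1 1 == x)

-- ===== PRECONDITION & SPEC =====
-- Python's max(lst) raises ValueError on the empty list, so A returns on exactly the non-empty lists.
def Pre_filter_factorials (lst : List Int) : Prop := lst ≠ []
instance (lst : List Int) : Decidable (Pre_filter_factorials lst) := by unfold Pre_filter_factorials; infer_instance
def pvWitness_filter_factorials : List Int := ([1, 5, 24])

def Spec_filter_factorials (lst : List Int) (out : List Int) : Prop := out = filter_factorials_alt lst
instance (lst : List Int) (out : List Int) : Decidable (Spec_filter_factorials lst out) := by unfold Spec_filter_factorials; infer_instance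

-- ===== CLAIM (what is proved, stated in full; the proofs are below) =====
def Claim_equal_filter_factorials : Prop := ∀ (lst : List Int), Dom_filter_factorials lst → Pre_filter_factorials lst → Spec_filter_factorials lst (filter_factorials lst)

-- ===== LEMMAS AND PROOFS =====

-- B's loop, when it is about to stop (f = k! ≥ x)
theorem isFactAux_stop (x : Int) (k : ℕ) (hxf : ¬ ((Nat.factorial k : ℕ) : Int) < x) :
    ((Nat.factorial k : ℕ) : Int) = x ↔ ∃ m : ℕ, k ≤ m ∧ x = ((Nat.factorial m : ℕ) : Int) := by
  constructor
  · intro h; exact ⟨k, le_refl k, h.symm⟩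
  · rintro ⟨m, hm, rfl⟩
    have h1 : Nat.factorial k ≤ Nat.factorial m := Nat.factorial_le hm
    have h2 : ((Nat.factorial k : ℕ) : Int) ≤ ((Nat.factorial m : ℕ) : Int) := by exact_mod_cast h1
    omega

theorem isFactAux_eq_iff_aux (N : ℕ) : ∀ (x : Int) (k : ℕ), (x - ((Nat.factorial k : ℕ) : Int)).toNat ≤ N → 1 ≤ k →
    (isFactAux x ((Nat.factorial k : ℕ) : Int) (k : Int) = x ↔ ∃ m : ℕ, k ≤ m ∧ x = ((Nat.factorial m : ℕ) : Int)) := by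
  induction N with
  | zero =>
    intro x k hN hk
    have hxf : ¬ ((Nat.factorial k : ℕ) : Int) < x := by omega
    rw [isFactAux]
    rw [dif_neg (by tauto)]
    exact isFactAux_stop x k hxf
  | succ N ih =>
    intro x k hN hk
    by_cases hxf : ((Nat.factorial k : ℕ) : Int) < x
    · have hfpos : (0 : Int) < ((Nat.factorial k : ℕ) : Int) := by exact_mod_cast Nat.factorial_pos k
      have hdpos : (0 : Int) < (k : Int) := by exact_mod_cast hk
      rw [isFactAux, dif_pos ⟨hxf, hfpos, hdpos⟩]
      have hstep : ((Nat.factorial k : ℕ) : Int) * ((k : Int) + 1) = ((Nat.factorial (k + 1) : ℕ) : Int) := by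
        push_cast [Nat.factorial_succ]; ring
      have hcast : ((k : Int) + 1) = ((k + 1 : ℕ) : Int) := by push_cast; ring
      rw [hstep, hcast]
      have hgrow : ((Nat.factorial k : ℕ) : Int) + 1 ≤ ((Nat.factorial (k + 1) : ℕ) : Int) := by
        have : Nat.factorial k + 1 ≤ Nat.factorial (k + 1) := by
          have h1 := Nat.factorial_pos k
          have : Nat.factorial (k + 1) = (k + 1) * Nat.factorial k := Nat.factorial_succ k
          nlinarith
        exact_mod_cast this
      rw [ih x (k + 1) (by omega) (by omega)]
      constructor
      · rintro ⟨m, hm, rfl⟩; exact ⟨m, by omega, rfl⟩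
      · rintro ⟨m, hm, rfl⟩
        refine ⟨m, ?_, rfl⟩
        rcases Nat.lt_or_ge k m with h | h
        · omega
        · have hmk : m = k := le_antisymm h hm
          subst hmk; omega
    · rw [isFactAux, dif_neg (by tauto)]
      exact isFactAux_stop x k hxf

-- B's loop, started at f = k!, d = k (k ≥ 1): it hits x iff x is a factorial m! with m ≥ k
theorem isFactAux_eq_iff (x : Int) (k : ℕ) (hk : 1 ≤ k) :
    isFactAux x ((Nat.factorial k : ℕ) : Int) (k : Int) = x ↔ ∃ m : ℕ, k ≤ m ∧ x = ((Nat.factorial m : ℕ) : Int) :=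
  isFactAux_eq_iff_aux (x - ((Nat.factorial k : ℕ) : Int)).toNat x k (le_refl _) hk

-- the special entry point f = d = 1
theorem isFactAux_one_iff (x : Int) :
    (isFactAux x 1 1 = x) ↔ ∃ m : ℕ, x = ((Nat.factorial m : ℕ) : Int) := by
  have h := isFactAux_eq_iff x 1 (le_refl 1)
  simp only [Nat.factorial_one, Nat.cast_one] at h
  rw [h]
  constructor
  · rintro ⟨m, _, rfl⟩; exact ⟨m, rfl⟩
  · rintro ⟨m, rfl⟩
    rcases Nat.eq_zero_or_pos m with h0 | h1
    · subst h0; exact ⟨1, le_refl 1, by simp [Nat.factorial]⟩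
    · exact ⟨m, h1, rfl⟩

-- A's fold over range(1, m+1) builds exactly 1 :: [1!, 2!, ..., m!] with running product m!
theorem facList_eq (m : ℕ) :
    (PySem.List.pyRange 1 ((m : Int) + 1) 1).foldl
      (fun (st : List Int × Int) i => (st.1 ++ [st.2 * i], st.2 * i)) ([1], 1)
    = (1 :: (List.range m).map (fun j => ((Nat.factorial (j + 1) : ℕ) : Int)), ((Nat.factorial m : ℕ) : Int)) := by
  induction m with
  | zero => simp [PySem.List.pyRange_one_eq_nil (by omega : (1:Int) + 1 ≤ 1 ∨ True ∧ (1:Int) ≤ 1)]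
  | succ m ih =>
    have hsplit : PySem.List.pyRange 1 (((m + 1 : ℕ) : Int) + 1) 1
        = PySem.List.pyRange 1 ((m : Int) + 1) 1 ++ [(m : Int) + 1] := by
      have := PySem.List.pyRange_one_succ_right (a := 1) (b := (m : Int) + 1) (by omega)
      push_cast
      convert this using 2
    rw [hsplit, List.foldl_append, ih]
    simp only [List.foldl_cons, List.foldl_nil, List.range_succ, List.map_append, List.map_cons,
      List.map_nil, List.cons_append]
    have hfac : ((Nat.factorial m : ℕ) : Int) * ((m : Int) + 1) = ((Nat.factorial (m + 1) : ℕ) : Int) := by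
      push_cast [Nat.factorial_succ]; ring
    rw [hfac]

-- for x ≤ n, membership in A's table is exactly factoriality
theorem mem_facList_iff (x n : Int) (hx : x ≤ n) :
    x ∈ ((PySem.List.pyRange 1 (n + 1) 1).foldl
      (fun (st : List Int × Int) i => (st.1 ++ [st.2 * i], st.2 * i)) ([1], 1)).1
    ↔ ∃ m : ℕ, x = ((Nat.factorial m : ℕ) : Int) := by
  by_cases hn : n ≤ 0
  · rw [PySem.List.pyRange_one_eq_nil (by omega)]
    simp only [List.foldl_nil, List.mem_singleton]
    constructor
    · intro h; omega
    · rintro ⟨m, rfl⟩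
      have : 0 < Nat.factorial m := Nat.factorial_pos m
      have : (0 : Int) < ((Nat.factorial m : ℕ) : Int) := by exact_mod_cast this
      omega
  · rw [not_le] at hn
    have hn' : n = ((n.toNat : ℕ) : Int) := (Int.toNat_of_nonneg (by omega)).symm
    rw [hn', facList_eq]
    simp only [List.mem_cons, List.mem_map, List.mem_range]
    constructor
    · rintro (h | ⟨j, hj, rfl⟩)
      · exact ⟨0, by simp [Nat.factorial, h]⟩
      · exact ⟨j + 1, rfl⟩
    · rintro ⟨m, rfl⟩
      rcases Nat.lt_or_ge m 2 with hm | hm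
      · left
        interval_cases m <;> simp [Nat.factorial]
      · right
        have hm1 : m - 1 + 1 = m := by omega
        refine ⟨m - 1, ?_, by rw [hm1]⟩
        have h1 : m ≤ Nat.factorial m := Nat.self_le_factorial m
        have h2 : ((Nat.factorial m : ℕ) : Int) ≤ ((n.toNat : ℕ) : Int) := by rw [← hn']; exact hx
        have h3 : Nat.factorial m ≤ n.toNat := by exact_mod_cast h2
        omega
-- ===== VERDICT (by name: the statement is the Claim_ definition above) =====
theorem filter_factorials_spec : Claim_equal_filter_factorials := by
  intro lst _ hpre
  unfold Spec_filter_factorials filter_factorials filter_factorials_alt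
  cases hmax : PySem.List.max? lst (fun x => x) with
  | none => exact absurd ((PySem.List.max?_eq_none_iff lst (fun x => x)).mp hmax) hpre
  | some n =>
    simp only []
    apply List.filter_congr
    intro x hxmem
    have hx : x ≤ n := PySem.List.max?_isMax hmax x hxmem
    rw [Bool.eq_iff_iff]
    simp only [List.contains_iff_mem, beq_iff_eq]
    rw [mem_facList_iff x n hx, isFactAux_one_iff]
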